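-- pv_equiv track=rewrite | github.com/StBinge/leetcode | 2156.find-substring-with-given-hash-value.py | subStrHash
-- ===== SOURCE A (Python) =====
-- def subStrHash(s: str, power: int, modulo: int, k: int, hashValue: int) -> str:
--     def code(ch):
--         return ord(ch)-ord('a')+1
--     pk=pow(power,k,modulo)
--     N=len(s)
--     h=0
--     ret=N
--     for i in range(N-1,N-k-1,-1):
--         h=(h*power+code(s[i]))%modulo
--     if h==hashValue:
--         ret=N-k
--     for i in range(N-k-1,-1,-1):
--         h=(h*power+code(s[i])-code(s[i+k])*pk)%modulo
--         if h==hashValue: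
--             ret=i
--     return s[ret:ret+k]
-- ===== SOURCE B (Python) =====
-- def subStrHash(s: str, power: int, modulo: int, k: int, hashValue: int) -> str:
--     # Direct search: hash each window from scratch by pairing its characters with a
--     # precomputed power table (first char weighted power^0, per the problem's hash
--     # definition) and return the leftmost match, or "" when no window matches.
--     # A window of negative length, or longer than s, does not exist: reject such k.
--     if not 0 <= k <= len(s):
--         raise ValueError("k must satisfy 0 <= k <= len(s)")
--     pw = [pow(power, j, modulo) for j in range(k)]
--     n = len(s)
--     for i in range(n - k + 1):
--         h = sum((ord(c) - ord('a') + 1) * p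
--                 for c, p in zip(s[i:i + k], pw, strict=True)) % modulo
--         if h == hashValue:
--             return s[i:i + k]
--     return ""
-- ===== Notes on version B (the rewrite author's own statement) =====
-- stated objective: simpler
-- what changed: A's backward rolling-hash sweep (Horner seeding loop plus an O(1)-update rolling recurrence tracking the best start index) is replaced by a plain forward scan over the natural domain 0 <= k <= len(s) that hashes each window from scratch against a precomputed power table and returns at the first (leftmost) match.
-- outside the precondition, e.g. on subStrHash('ab', 7, 100, 3, 7): A returns 'b', B raises ValueError
import Mathlib
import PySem

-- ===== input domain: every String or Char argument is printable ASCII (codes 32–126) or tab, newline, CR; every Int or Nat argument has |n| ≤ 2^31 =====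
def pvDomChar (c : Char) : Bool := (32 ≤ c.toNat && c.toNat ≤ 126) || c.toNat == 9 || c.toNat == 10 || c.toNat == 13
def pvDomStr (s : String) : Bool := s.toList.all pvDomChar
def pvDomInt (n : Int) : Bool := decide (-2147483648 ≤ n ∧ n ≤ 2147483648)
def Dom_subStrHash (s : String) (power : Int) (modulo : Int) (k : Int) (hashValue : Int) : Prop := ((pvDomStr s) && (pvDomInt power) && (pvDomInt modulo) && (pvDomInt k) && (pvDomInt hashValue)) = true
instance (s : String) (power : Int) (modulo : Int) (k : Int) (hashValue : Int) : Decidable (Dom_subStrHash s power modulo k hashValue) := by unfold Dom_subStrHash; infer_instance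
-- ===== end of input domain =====

-- B replaces A's backward rolling-hash sweep by a direct forward search that hashes each
-- window from scratch and returns at the first (leftmost) match: simpler, not faster.

-- ===== PORT A =====
-- code(ch) = ord(ch) - ord('a') + 1  (A's nested helper; ord('a') = 97)
def chCode (c : Char) : Int := (c.toNat : Int) - 97 + 1

-- literal port of A: pow(power,k,modulo), a backward Horner loop seeding the rolling hash,
-- then the rolling sweep keeping the smallest matching start index in ret.
-- (k.toNat is exact under Pre_, which demands 0 ≤ k — Python's pow raises for k < 0 here.)
def subStrHash (s : String) (power : Int) (modulo : Int) (k : Int) (hashValue : Int) : String :=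
  let cs := s.toList
  let pk := PySem.Int.powMod power k.toNat modulo
  let N : Int := (cs.length : Int)
  let h1 := (PySem.List.pyRange (N - 1) (N - k - 1) (-1)).foldl
      (fun h i => PySem.Int.mod (h * power + chCode (PySem.List.pyGetD cs i ' ')) modulo) 0
  let ret1 : Int := if h1 = hashValue then N - k else N
  let st := (PySem.List.pyRange (N - k - 1) (-1) (-1)).foldl
      (fun (st : Int × Int) i =>
        let h := PySem.Int.mod (st.1 * power + chCode (PySem.List.pyGetD cs i ' ')
                   - chCode (PySem.List.pyGetD cs (i + k) ' ') * pk) modulo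
        (h, if h = hashValue then i else st.2)) (h1, ret1)
  PySem.Str.slice s (some st.2) (some (st.2 + k))

-- ===== PORT B =====
-- literal port of Source B: precompute pw[j] = pow(power,j,modulo), then scan windows left to
-- right, hashing each one directly by zipping the window with pw; first match wins, else "".
-- (Source B's domain guard raises exactly outside Pre_'s 0 ≤ k ≤ len(s), so it is not modelled;
-- zip(..., strict=True) is ported as List.zip: under Pre_ every window has exactly
-- k = len(pw) characters, where the two are identical.)
def subStrHash_alt (s : String) (power : Int) (modulo : Int) (k : Int) (hashValue : Int) : String :=
  let cs := s.toList
  let pw := (PySem.List.pyRange 0 k 1).map (fun j => PySem.Int.powMod power j.toNat modulo)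
  let n : Int := (cs.length : Int)
  match (PySem.List.pyRange 0 (n - k + 1) 1).find? (fun i =>
      decide (PySem.Int.mod ((((PySem.List.slice cs (some i) (some (i + k))).zip pw).map
          (fun cp => ((cp.1.toNat : Int) - 97 + 1) * cp.2)).sum) modulo = hashValue)) with
  | some i => PySem.Str.slice s (some i) (some (i + k))
  | none => ""

-- ===== PRECONDITION & SPEC =====
-- Pre_ is the natural domain 0 ≤ k ≤ len(s) (B rejects other k with a ValueError guard:
-- such a window does not exist) plus modulo ≠ 0 (A raises ValueError/ZeroDivisionError at
-- modulo = 0). Outside it A raises (k < 0, k > 2·len(s), modulo = 0) or, on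
-- len(s) < k ≤ 2·len(s), returns a value produced by accidental negative-index wraparound
-- in its seeding loop, while B raises its domain guard there.
def Pre_subStrHash (s : String) (power : Int) (modulo : Int) (k : Int) (hashValue : Int) : Prop :=
  0 ≤ k ∧ k ≤ (s.toList.length : Int) ∧ modulo ≠ 0
instance (s : String) (power : Int) (modulo : Int) (k : Int) (hashValue : Int) : Decidable (Pre_subStrHash s power modulo k hashValue) := by unfold Pre_subStrHash; infer_instance

def pvWitness_subStrHash : String × Int × Int × Int × Int := ("ab", 7, 100, 1, 1)

def Spec_subStrHash (s : String) (power : Int) (modulo : Int) (k : Int) (hashValue : Int) (out : String) : Prop := out = subStrHash_alt s power modulo k hashValue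
instance (s : String) (power : Int) (modulo : Int) (k : Int) (hashValue : Int) (out : String) : Decidable (Spec_subStrHash s power modulo k hashValue out) := by unfold Spec_subStrHash; infer_instance

-- ===== CLAIM (what is proved, stated in full; the proofs are below) =====
def Claim_equal_subStrHash : Prop := ∀ (s : String) (power : Int) (modulo : Int) (k : Int) (hashValue : Int), Dom_subStrHash s power modulo k hashValue → Pre_subStrHash s power modulo k hashValue → Spec_subStrHash s power modulo k hashValue (subStrHash s power modulo k hashValue)

-- ===== LEMMAS AND PROOFS =====

-- the mathematical window hash: sum of code(cs[i+j]) * p^j over j < kk (getD-total)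
def winHash (cs : List Char) (p : Int) (i kk : Nat) : Int :=
  ((List.range kk).map (fun j => chCode (cs.getD (i + j) ' ') * p ^ j)).sum

-- the match predicate both programs test
def winMatch (cs : List Char) (p m hv : Int) (kk : Nat) (i : Nat) : Bool :=
  decide (PySem.Int.mod (winHash cs p i kk) m = hv)

-- first matching start in [s0, s0+t), else the fallback r
def fstMatch (cs : List Char) (p m hv : Int) (kk : Nat) (s0 t : Nat) (r : Int) : Int :=
  match (List.range' s0 t).find? (winMatch cs p m hv kk) with
  | some i => (i : Int)
  | none => r

lemma pymod_modEq (a m : Int) : Int.ModEq m (PySem.Int.mod a m) a := by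
  show (PySem.Int.mod a m) % m = a % m
  show (Int.fmod a m) % m = a % m
  rw [Int.fmod_eq_emod]
  split
  · simpa using Int.emod_emod_of_dvd a dvd_rfl
  · have h1 : (a % m + m * 1) % m = (a % m) % m := Int.add_mul_emod_self_left ..
    simpa using h1.trans (Int.emod_emod_of_dvd a dvd_rfl)

lemma pymod_congr {m a b : Int} (h : Int.ModEq m a b) : PySem.Int.mod a m = PySem.Int.mod b m := by
  show Int.fmod a m = Int.fmod b m
  have hd : (m ∣ a) ↔ (m ∣ b) := by
    rw [Int.dvd_iff_emod_eq_zero, Int.dvd_iff_emod_eq_zero, h]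
  rw [Int.fmod_eq_emod, Int.fmod_eq_emod, h]
  by_cases hc : 0 ≤ m ∨ m ∣ a
  · rw [if_pos hc, if_pos (by tauto)]
  · rw [if_neg hc, if_neg (by tauto)]

lemma winHash_succ_down (cs : List Char) (p : Int) (a t : Nat) (ha : 1 ≤ a) :
    winHash cs p (a - 1) (t + 1) = chCode (cs.getD (a - 1) ' ') + p * winHash cs p a t := by
  unfold winHash
  rw [List.range_succ_eq_map, List.map_cons, List.map_map, List.sum_cons]
  have h1 : ∀ j ∈ List.range t,
      ((fun j => chCode (cs.getD (a - 1 + j) ' ') * p ^ j) ∘ Nat.succ) j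
        = p * (chCode (cs.getD (a + j) ' ') * p ^ j) := by
    intro j _
    have e : a - 1 + (j + 1) = a + j := by omega
    simp only [Function.comp, Nat.succ_eq_add_one, e]
    ring
  rw [List.map_congr_left h1, List.sum_map_mul_left]
  simp

lemma winHash_last (cs : List Char) (p : Int) (i kk : Nat) :
    winHash cs p i (kk + 1) = winHash cs p i kk + chCode (cs.getD (i + kk) ' ') * p ^ kk := by
  unfold winHash
  rw [List.range_succ, List.map_append, List.sum_append]
  simp

lemma winHash_roll (cs : List Char) (p : Int) (a kk : Nat) (ha : 1 ≤ a) :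
    winHash cs p (a - 1) kk
      = chCode (cs.getD (a - 1) ' ') + p * winHash cs p a kk
        - chCode (cs.getD (a - 1 + kk) ' ') * p ^ kk := by
  have h1 := winHash_last cs p (a - 1) kk
  have h2 := winHash_succ_down cs p a kk ha
  linarith

lemma sum_modEq (m : Int) (l : List Nat) (f g : Nat → Int)
    (h : ∀ x ∈ l, Int.ModEq m (f x) (g x)) :
    Int.ModEq m ((l.map f).sum) ((l.map g).sum) := by
  induction l with
  | nil => rfl
  | cons x xs ih =>
    simp only [List.map_cons, List.sum_cons]
    exact (h x (by simp)).add (ih (fun y hy => h y (by simp [hy])))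

-- A's seeding loop is the window hash of the window ending at index b-1
lemma horner_loop (cs : List Char) (p m : Int) :
    ∀ (t b : Nat), t ≤ b →
    ((List.range t).map (fun u => ((b - 1 - u : Nat) : Int))).foldl
      (fun h i => PySem.Int.mod (h * p + chCode (PySem.List.pyGetD cs i ' ')) m) 0
    = PySem.Int.mod (winHash cs p (b - t) t) m := by
  intro t
  induction t with
  | zero =>
    intro b _
    simp [winHash, PySem.Int.mod, Int.zero_fmod]
  | succ t ih =>
    intro b hb
    rw [List.range_succ, List.map_append, List.foldl_append, ih b (by omega)]
    simp only [List.map_cons, List.map_nil, List.foldl_cons, List.foldl_nil,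
      PySem.List.pyGetD_natCast]
    apply pymod_congr
    have hW : winHash cs p (b - (t + 1)) (t + 1)
        = chCode (cs.getD (b - 1 - t) ' ') + p * winHash cs p (b - t) t := by
      have e1 : b - (t + 1) = b - t - 1 := by omega
      have e2 : b - t - 1 = b - 1 - t := by omega
      rw [e1, winHash_succ_down cs p (b - t) t (by omega), e2]
    rw [hW]
    have := (pymod_modEq (winHash cs p (b - t) t) m).mul_right p
    have h2 := this.add_right (chCode (cs.getD (b - 1 - t) ' '))
    have e : winHash cs p (b - t) t * p + chCode (cs.getD (b - 1 - t) ' ')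
        = chCode (cs.getD (b - 1 - t) ' ') + p * winHash cs p (b - t) t := by ring
    rw [e] at h2
    exact h2

-- A's rolling sweep: invariant for the second loop
lemma roll_loop (cs : List Char) (p m hv : Int) (kk : Nat) :
    ∀ (t a : Nat) (r : Int), t ≤ a →
    ((List.range t).map (fun u => ((a - 1 - u : Nat) : Int))).foldl
      (fun (st : Int × Int) i =>
        (PySem.Int.mod (st.1 * p + chCode (PySem.List.pyGetD cs i ' ')
           - chCode (PySem.List.pyGetD cs (i + (kk : Int)) ' ') * PySem.Int.powMod p ((kk : Int)).toNat m) m,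
         if PySem.Int.mod (st.1 * p + chCode (PySem.List.pyGetD cs i ' ')
              - chCode (PySem.List.pyGetD cs (i + (kk : Int)) ' ') * PySem.Int.powMod p ((kk : Int)).toNat m) m = hv
         then i else st.2))
      (PySem.Int.mod (winHash cs p a kk) m, r)
    = (PySem.Int.mod (winHash cs p (a - t) kk) m, fstMatch cs p m hv kk (a - t) t r) := by
  intro t
  induction t with
  | zero =>
    intro a r _
    simp [fstMatch]
  | succ t ih =>
    intro a r hta
    rw [List.range_succ, List.map_append, List.foldl_append, ih a r (by omega)]
    simp only [List.map_cons, List.map_nil, List.foldl_cons, List.foldl_nil,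
      PySem.List.pyGetD_natCast, Int.toNat_natCast]
    have ecast : ((a - 1 - t : Nat) : Int) + (kk : Int) = ((a - 1 - t + kk : Nat) : Int) := by
      push_cast; ring
    rw [ecast, PySem.List.pyGetD_natCast]
    have hh : PySem.Int.mod
        (PySem.Int.mod (winHash cs p (a - t) kk) m * p + chCode (cs.getD (a - 1 - t) ' ')
          - chCode (cs.getD (a - 1 - t + kk) ' ') * PySem.Int.powMod p kk m) m
        = PySem.Int.mod (winHash cs p (a - (t + 1)) kk) m := by
      apply pymod_congr
      have hW : winHash cs p (a - (t + 1)) kk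
          = chCode (cs.getD (a - 1 - t) ' ') + p * winHash cs p (a - t) kk
            - chCode (cs.getD (a - 1 - t + kk) ' ') * p ^ kk := by
        have e1 : a - (t + 1) = a - t - 1 := by omega
        have e2 : a - t - 1 = a - 1 - t := by omega
        rw [e1, winHash_roll cs p (a - t) kk (by omega), e2]
      rw [hW]
      have hm1 := (pymod_modEq (winHash cs p (a - t) kk) m).mul_right p
      have hm2 := (pymod_modEq (p ^ kk) m).mul_left (chCode (cs.getD (a - 1 - t + kk) ' '))
      have hmod : Int.ModEq m
          (PySem.Int.mod (winHash cs p (a - t) kk) m * p + chCode (cs.getD (a - 1 - t) ' ')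
            - chCode (cs.getD (a - 1 - t + kk) ' ') * PySem.Int.powMod p kk m)
          (winHash cs p (a - t) kk * p + chCode (cs.getD (a - 1 - t) ' ')
            - chCode (cs.getD (a - 1 - t + kk) ' ') * p ^ kk) :=
        (hm1.add_right _).sub hm2
      refine hmod.trans ?_
      have e : winHash cs p (a - t) kk * p + chCode (cs.getD (a - 1 - t) ' ')
          - chCode (cs.getD (a - 1 - t + kk) ' ') * p ^ kk
          = chCode (cs.getD (a - 1 - t) ' ') + p * winHash cs p (a - t) kk
            - chCode (cs.getD (a - 1 - t + kk) ' ') * p ^ kk := by ring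
      rw [e]
    simp only [hh]
    refine Prod.ext rfl ?_
    show (if PySem.Int.mod (winHash cs p (a - (t + 1)) kk) m = hv
        then ((a - 1 - t : Nat) : Int) else fstMatch cs p m hv kk (a - t) t r)
      = fstMatch cs p m hv kk (a - (t + 1)) (t + 1) r
    have e1 : a - (t + 1) = a - 1 - t := by omega
    have e2 : a - 1 - t + 1 = a - t := by omega
    unfold fstMatch
    rw [List.range'_succ, e1, e2]
    by_cases hc : PySem.Int.mod (winHash cs p (a - 1 - t) kk) m = hv
    · rw [if_pos hc, List.find?_cons_of_pos (by simp [winMatch, hc])]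
    · rw [if_neg hc, List.find?_cons_of_neg (by simp [winMatch, hc])]

-- zipping a full window with an indexed table is the index-sum over the window
lemma zip_window (cs : List Char) :
    ∀ (kk : Nat) (q : Nat → Int) (i : Nat), i + kk ≤ cs.length →
    ((((cs.drop i).take kk).zip ((List.range kk).map q)).map
        (fun cp => ((cp.1.toNat : Int) - 97 + 1) * cp.2)).sum
    = ((List.range kk).map (fun j => chCode (cs.getD (i + j) ' ') * q j)).sum := by
  intro kk
  induction kk with
  | zero => intro q i _; simp
  | succ kk ih =>
    intro q i hik
    have hi : i < cs.length := by omega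
    rw [List.drop_eq_getElem_cons hi, List.take_succ_cons,
      List.range_succ_eq_map, List.map_cons, List.zip_cons_cons,
      List.map_cons, List.sum_cons, List.map_map,
      ih (q ∘ Nat.succ) (i + 1) (by omega),
      List.map_cons, List.sum_cons, List.map_map]
    congr 1
    · rw [Nat.add_zero, List.getD_eq_getElem cs ' ' hi]
      rfl
    · exact congrArg List.sum (List.map_congr_left (fun j _ => by
        simp [Function.comp, show i + 1 + j = i + (j + 1) from by omega]))

-- find? only looks at members
lemma find?_congr_mem {α : Type} (l : List α) (p q : α → Bool)
    (h : ∀ x ∈ l, p x = q x) : l.find? p = l.find? q := by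
  induction l with
  | nil => rfl
  | cons x xs ih =>
    simp only [List.find?]
    rw [h x (by simp)]
    cases q x
    · exact ih (fun y hy => h y (by simp [hy]))
    · rfl

-- B's window test equals the match predicate (on in-range window starts)
lemma bpred_eq (cs : List Char) (p m hv : Int) (kk : Nat) (i : Nat)
    (hik : i + kk ≤ cs.length) :
    decide (PySem.Int.mod ((((PySem.List.slice cs (some ((i : Nat) : Int))
        (some ((i : Int) + (kk : Int)))).zip
        ((PySem.List.pyRange 0 (kk : Int) 1).map
          (fun j => PySem.Int.powMod p j.toNat m))).map
        (fun cp => ((cp.1.toNat : Int) - 97 + 1) * cp.2)).sum) m = hv)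
      = winMatch cs p m hv kk i := by
  have hslice : PySem.List.slice cs (some ((i : Nat) : Int)) (some ((i : Int) + (kk : Int)))
      = (cs.drop i).take kk := by
    have e : (i : Int) + (kk : Int) = ((i + kk : Nat) : Int) := by push_cast; ring
    rw [e, PySem.List.slice_natCast]
    simp
  have hpw : (PySem.List.pyRange 0 (kk : Int) 1).map (fun j => PySem.Int.powMod p j.toNat m)
      = (List.range kk).map (fun j => PySem.Int.mod (p ^ j) m) := by
    rw [PySem.List.pyRange_zero_natCast, List.map_map]
    refine List.map_congr_left (fun j _ => ?_)
    simp [Function.comp, PySem.Int.powMod]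
  have key : PySem.Int.mod ((((PySem.List.slice cs (some ((i : Nat) : Int))
        (some ((i : Int) + (kk : Int)))).zip
        ((PySem.List.pyRange 0 (kk : Int) 1).map
          (fun j => PySem.Int.powMod p j.toNat m))).map
        (fun cp => ((cp.1.toNat : Int) - 97 + 1) * cp.2)).sum) m
      = PySem.Int.mod (winHash cs p i kk) m := by
    rw [hslice, hpw, zip_window cs kk (fun j => PySem.Int.mod (p ^ j) m) i hik]
    apply pymod_congr
    show Int.ModEq m _ (winHash cs p i kk)
    unfold winHash
    exact sum_modEq m (List.range kk) _ _
      (fun x _ => (pymod_modEq (p ^ x) m).mul_left (chCode (cs.getD (i + x) ' ')))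
  simp [winMatch, key]

theorem subStrHash_spec : Claim_equal_subStrHash := by
  intro s power modulo k hashValue _hdom hpre
  obtain ⟨hk0, hkn, _hm0⟩ := hpre
  unfold Spec_subStrHash
  obtain ⟨kk, rfl⟩ : ∃ kk : Nat, k = (kk : Int) :=
    ⟨k.toNat, (Int.toNat_of_nonneg (by omega)).symm⟩
  have hkk : kk ≤ s.toList.length := by exact_mod_cast hkn
  simp only [subStrHash, subStrHash_alt]
  set cs : List Char := s.toList with hcs
  set n : Nat := cs.length with hn
  have hE1 : PySem.List.pyRange ((n : Int) - 1) ((n : Int) - (kk : Int) - 1) (-1)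
      = (List.range kk).map (fun u => ((n - 1 - u : Nat) : Int)) := by
    rw [PySem.List.pyRange_neg_one]
    have e : (((n : Int) - 1) - ((n : Int) - (kk : Int) - 1)).toNat = kk := by omega
    rw [e]
    refine List.map_congr_left (fun u hu => ?_)
    rw [List.mem_range] at hu
    omega
  have hE2 : PySem.List.pyRange ((n : Int) - (kk : Int) - 1) (-1) (-1)
      = (List.range (n - kk)).map (fun u => ((n - kk - 1 - u : Nat) : Int)) := by
    rw [PySem.List.pyRange_neg_one]
    have e : (((n : Int) - (kk : Int) - 1) - (-1)).toNat = n - kk := by omega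
    rw [e]
    refine List.map_congr_left (fun u hu => ?_)
    rw [List.mem_range] at hu
    omega
  rw [hE1, hE2, horner_loop cs power modulo kk n hkk]
  simp only [roll_loop cs power modulo hashValue kk (n - kk) (n - kk)
      (if PySem.Int.mod (winHash cs power (n - kk) kk) modulo = hashValue
        then (n : Int) - (kk : Int) else (n : Int)) (le_refl _)]
  simp only [Nat.sub_self]
  have hE3 : (n : Int) - (kk : Int) + 1 = ((n - kk + 1 : Nat) : Int) := by omega
  rw [hE3, PySem.List.pyRange_zero_natCast (n - kk + 1), List.find?_map]
  rw [find?_congr_mem (List.range (n - kk + 1))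
      ((fun i => decide (PySem.Int.mod ((((PySem.List.slice cs (some i)
            (some (i + ((kk : Nat) : Int)))).zip
            ((PySem.List.pyRange 0 ((kk : Nat) : Int) 1).map
              (fun j => PySem.Int.powMod power j.toNat modulo))).map
            (fun cp => ((cp.1.toNat : Int) - 97 + 1) * cp.2)).sum) modulo = hashValue))
        ∘ (fun (x : Nat) => (x : Int)))
      (winMatch cs power modulo hashValue kk)
      (fun i hi => bpred_eq cs power modulo hashValue kk i
        (by rw [List.mem_range] at hi; omega))]
  have hr1 : ((n : Int) - (kk : Int)) = ((n - kk : Nat) : Int) := by omega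
  have hcomb : fstMatch cs power modulo hashValue kk 0 (n - kk)
      (if PySem.Int.mod (winHash cs power (n - kk) kk) modulo = hashValue
        then (n : Int) - (kk : Int) else (n : Int))
      = (match (List.range (n - kk + 1)).find? (winMatch cs power modulo hashValue kk) with
        | some i => (i : Int)
        | none => (n : Int)) := by
    unfold fstMatch
    rw [← List.range_eq_range', List.range_succ, List.find?_append]
    cases hfl : (List.range (n - kk)).find? (winMatch cs power modulo hashValue kk) with
    | some i => simp
    | none =>
      by_cases hc : PySem.Int.mod (winHash cs power (n - kk) kk) modulo = hashValue
      · simp [List.find?, winMatch, hc, hr1]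
      · simp [List.find?, winMatch, hc]
  rw [hcomb]
  cases hfind : (List.range (n - kk + 1)).find? (winMatch cs power modulo hashValue kk) with
  | some i => simp
  | none =>
    simp only [Option.map_none]
    have hnil : (PySem.Str.slice s (some ((n : Int)))
        (some ((n : Int) + (kk : Int)))).toList = [] := by
      rw [PySem.Str.toList_slice, PySem.Chars.slice_eq_listSlice, ← hcs]
      have e : ((n : Int) + (kk : Int)) = ((n + kk : Nat) : Int) := by omega
      rw [e, PySem.List.slice_natCast]
      simp [hn, List.drop_length]
    exact String.toList_eq_nil_iff.mp hnil
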